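-- pv_equiv track=rewrite | github.com/umr-ds/traffic-ui | flowinspector.py | computeGapCount
-- ===== SOURCE A (Python) =====
-- def computeGapCount(traffic):
--     gaps = 0
--     inGap = True
--     for i, t in enumerate(traffic):
--         # entering gap
--         if not inGap and t == 0:
--             inGap = True
--             gaps += 1
--         # leaving gap
--         if inGap and t > 0:
--             inGap = False
--     return gaps
-- ===== SOURCE B (Python) =====
-- def computeGapCount(traffic):
--     # filter to "events" (non-negative values), then count positive->zero adjacent pairs
--     events = [t for t in traffic if t >= 0]
--     return sum(1 for p, c in zip(events, events[1:]) if p > 0 and c == 0)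
-- ===== Notes on version B (the rewrite author's own statement) =====
-- stated objective: alternative
-- what changed: B replaces A's stateful inGap boolean scan with a filter of non-negative 'events' followed by a pairwise (zip) count of positive-to-zero adjacent transitions.
import Mathlib
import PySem

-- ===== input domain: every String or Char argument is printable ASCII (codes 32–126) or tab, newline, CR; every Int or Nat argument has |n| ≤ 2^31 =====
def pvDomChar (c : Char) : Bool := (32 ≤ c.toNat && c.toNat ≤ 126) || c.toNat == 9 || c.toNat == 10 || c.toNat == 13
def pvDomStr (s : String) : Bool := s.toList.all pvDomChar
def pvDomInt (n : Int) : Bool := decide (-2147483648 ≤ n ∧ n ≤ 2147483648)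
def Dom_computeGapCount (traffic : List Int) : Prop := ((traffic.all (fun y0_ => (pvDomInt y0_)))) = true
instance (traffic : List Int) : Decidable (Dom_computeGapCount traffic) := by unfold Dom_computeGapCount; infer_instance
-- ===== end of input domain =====

-- ===== PORT A =====
-- loop body of A's for-loop over (gaps, inGap)
def stepA (st : Int × Bool) (t : Int) : Int × Bool :=
  let st := if !st.2 && t == 0 then (st.1 + 1, true) else st
  if st.2 && decide (0 < t) then (st.1, false) else st

def computeGapCount (traffic : List Int) : Int :=
  (traffic.foldl stepA (0, true)).1

-- ===== PORT B =====
-- B restates A's inGap state machine as filter-nonnegative + pairwise positive->zero count (alternative decomposition, same cost).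
def computeGapCount_alt (traffic : List Int) : Int :=
  let events := traffic.filter (fun t => decide (0 ≤ t))
  (events.zip (events.drop 1)).foldl
    (fun acc pc => if 0 < pc.1 ∧ pc.2 = 0 then acc + 1 else acc) 0

-- ===== PRECONDITION & SPEC =====
def Spec_computeGapCount (traffic : List Int) (out : Int) : Prop := out = computeGapCount_alt traffic
instance (traffic : List Int) (out : Int) : Decidable (Spec_computeGapCount traffic out) := by unfold Spec_computeGapCount; infer_instance

-- ===== CLAIM (what is proved, stated in full; the proofs are below) =====
def Claim_equal_computeGapCount : Prop := ∀ (traffic : List Int), Dom_computeGapCount traffic → Spec_computeGapCount traffic (computeGapCount traffic)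

-- ===== LEMMAS AND PROOFS =====

-- pairwise positive->zero count, recursively
def pcRec : List Int → Int
  | a :: b :: r => (if 0 < a ∧ b = 0 then 1 else 0) + pcRec (b :: r)
  | _ => 0

-- A's state machine, with the accumulator dropped
def fAux : Bool → List Int → Int
  | _, [] => 0
  | b, t :: ts =>
      if t = 0 then (if b then 0 else 1) + fAux true ts
      else if 0 < t then fAux false ts
      else fAux b ts

theorem foldl_zip_eq_pcRec (es : List Int) (acc : Int) :
    (es.zip (es.drop 1)).foldl
      (fun acc pc => if 0 < pc.1 ∧ pc.2 = 0 then acc + 1 else acc) acc = acc + pcRec es := by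
  induction es generalizing acc with
  | nil => simp [pcRec]
  | cons a tl ih =>
    cases tl with
    | nil => simp [pcRec]
    | cons b r =>
      simp only [List.drop_succ_cons, List.drop_zero] at ih ⊢
      simp only [List.zip_cons_cons, List.foldl_cons]
      rw [ih]
      simp only [pcRec]
      split_ifs <;> omega

theorem stepA_neg (g : Int) (b : Bool) (t : Int) (h1 : t < 0) :
    stepA (g, b) t = (g, b) := by
  have h0 : (t == 0) = false := by simp; omega
  have h2 : decide (0 < t) = false := by simp; omega
  simp [stepA, h0, h2]

theorem stepA_zero (g : Int) (b : Bool) :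
    stepA (g, b) 0 = (if b then g else g + 1, true) := by
  cases b <;> simp [stepA]

theorem stepA_pos (g : Int) (b : Bool) (t : Int) (h : 0 < t) :
    stepA (g, b) t = (g, false) := by
  have h0 : (t == 0) = false := by simp; omega
  cases b <;> simp [stepA, h0, h]

theorem foldlA_eq_fAux (l : List Int) (g : Int) (b : Bool) :
    (l.foldl stepA (g, b)).1 = g + fAux b l := by
  induction l generalizing g b with
  | nil => simp [fAux]
  | cons t ts ih =>
    rw [List.foldl_cons]
    rcases lt_trichotomy t 0 with h | h | h
    · rw [stepA_neg g b t h, ih]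
      have h0 : ¬ t = 0 := by omega
      have h1 : ¬ 0 < t := by omega
      simp [fAux, h0, h1]
    · subst h
      rw [stepA_zero]
      cases b with
      | false => simp [fAux, ih]; ring
      | true => simp [fAux, ih]
    · rw [stepA_pos g b t h, ih]
      have h0 : ¬ t = 0 := by omega
      simp [fAux, h0, h]

theorem fAux_eq_pcRec (l : List Int) (b : Bool) (c : Int)
    (hc : 0 < c ↔ b = false) :
    fAux b l = pcRec (c :: l.filter (fun t => decide (0 ≤ t))) := by
  induction l generalizing b c with
  | nil => simp [fAux, pcRec]
  | cons t ts ih =>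
    rcases lt_trichotomy t 0 with h | h | h
    · have h0 : ¬ t = 0 := by omega
      have h1 : ¬ 0 < t := by omega
      have hf : ¬ (0 ≤ t) := by omega
      simp only [fAux, if_neg h0, if_neg h1, List.filter_cons, decide_eq_true_eq, if_neg hf]
      exact ih b c hc
    · subst h
      simp only [fAux, List.filter_cons]
      norm_num
      rw [ih true 0 (by simp)]
      simp only [pcRec]
      cases b with
      | false => simp only [iff_true] at hc; simp [hc]
      | true =>
        have : ¬ 0 < c := by simp [hc]
        simp [this]
    · have h0 : ¬ t = 0 := by omega
      have hf : (0 ≤ t) := by omega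
      simp only [fAux, if_neg h0, if_pos h, List.filter_cons, decide_eq_true_eq, if_pos hf]
      rw [ih false t (by simp [h])]
      simp [pcRec, h0]

theorem pcRec_zero_cons (es : List Int) : pcRec (0 :: es) = pcRec es := by
  cases es <;> simp [pcRec]

-- ===== VERDICT (by name: the statement is the Claim_ definition above) =====
theorem computeGapCount_spec : Claim_equal_computeGapCount := by
  intro traffic _
  unfold Spec_computeGapCount computeGapCount computeGapCount_alt
  rw [foldlA_eq_fAux, foldl_zip_eq_pcRec, fAux_eq_pcRec traffic true 0 (by simp),
    pcRec_zero_cons]
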